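-- pv_equiv track=rewrite | github.com/zoom-packers/zoompack-v4-client | python_tools/quest_rewards.py | convert_money
-- ===== SOURCE A (Python) =====
-- def convert_money(reward):
--     """Normalize simple primary rewards into proper wallet denominations (base-64)."""
--     if len(reward) == 5 and reward[1:5] == [0, 0, 0, 0]:
--         total = reward[0]
--         result = [0, 0, 0, 0, 0]
--         for i in range(5):
--             result[i] = total % 64
--             total //= 64
--         return result
--     return reward
-- ===== SOURCE B (Python) =====
-- def convert_money(reward):
--     """Normalize simple primary rewards into proper wallet denominations (base-64)."""
--     if len(reward) == 5 and reward[1:5] == [0, 0, 0, 0]: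
--         t = reward[0] % 64 ** 5
--         result = []
--         for p in (64 ** 4, 64 ** 3, 64 ** 2, 64, 1):
--             d, t = divmod(t, p)
--             result.append(d)
--         result.reverse()
--         return result
--     return reward
-- ===== Notes on version B (the rewrite author's own statement) =====
-- stated objective: alternative
-- what changed: Replaces A's least-significant-first loop that repeatedly takes % 64 and floor-divides a running quotient with one modular reduction of the first entry by 64**5 followed by greedy change-making: divmod by descending denominations 64**4..1, appending the most significant digit first and reversing at the end.
import Mathlib
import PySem

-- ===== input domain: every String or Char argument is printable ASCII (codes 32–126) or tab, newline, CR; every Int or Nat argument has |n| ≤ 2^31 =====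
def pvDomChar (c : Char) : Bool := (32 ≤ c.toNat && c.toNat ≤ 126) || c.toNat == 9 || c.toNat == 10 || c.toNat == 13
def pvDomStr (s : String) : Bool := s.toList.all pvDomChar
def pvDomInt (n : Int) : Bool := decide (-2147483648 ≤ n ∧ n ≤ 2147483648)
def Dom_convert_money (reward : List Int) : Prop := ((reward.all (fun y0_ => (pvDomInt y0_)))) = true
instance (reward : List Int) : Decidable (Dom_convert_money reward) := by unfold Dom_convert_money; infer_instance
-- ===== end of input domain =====

-- B replaces A's least-significant-first repeated-division loop by one initial modular
-- reduction (first entry % 64^5) followed by greedy change-making over descending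
-- denominations 64^4..1 with divmod, building the list most-significant-first and
-- reversing it (objective: alternative).


-- ===== PORT A =====
def convert_money (reward : List Int) : List Int :=
  if reward.length == 5 && PySem.List.slice reward (some 1) (some 5) == [0, 0, 0, 0] then
    -- total = reward[0]; result = [0,0,0,0,0]; for i in range(5): result[i] = total % 64; total //= 64
    let st := (PySem.List.pyRange 0 5 1).foldl
      (fun (st : Int × List Int) i =>
        (PySem.Int.floordiv st.1 64, PySem.List.pySetD st.2 i (PySem.Int.mod st.1 64)))
      (PySem.List.pyGetD reward 0 0, [0, 0, 0, 0, 0])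
    st.2
  else reward

-- ===== PORT B =====
def convert_money_alt (reward : List Int) : List Int :=
  if reward.length == 5 && PySem.List.slice reward (some 1) (some 5) == [0, 0, 0, 0] then
    -- t = reward[0] % 64**5; for p in (64**4, ..., 1): d, t = divmod(t, p); result.append(d); reverse
    let t0 := PySem.Int.mod (PySem.List.pyGetD reward 0 0) (64 ^ 5)
    let st := ([(64:Int) ^ 4, 64 ^ 3, 64 ^ 2, 64, 1]).foldl
      (fun (st : List Int × Int) p =>
        (st.1 ++ [PySem.Int.floordiv st.2 p], PySem.Int.mod st.2 p))
      ([], t0)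
    st.1.reverse
  else reward

-- ===== PRECONDITION & SPEC =====
def Spec_convert_money (reward : List Int) (out : List Int) : Prop := out = convert_money_alt reward
instance (reward : List Int) (out : List Int) : Decidable (Spec_convert_money reward out) := by unfold Spec_convert_money; infer_instance

-- ===== CLAIM (what is proved, stated in full; the proofs are below) =====
def Claim_equal_convert_money : Prop := ∀ (reward : List Int), Dom_convert_money reward → Spec_convert_money reward (convert_money reward)

-- ===== LEMMAS AND PROOFS =====

-- ===== VERDICT (by name: the statement is the Claim_ definition above) =====
theorem convert_money_spec : Claim_equal_convert_money := by
  intro reward _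
  unfold Spec_convert_money convert_money convert_money_alt
  split
  · have hr : PySem.List.pyRange 0 5 1 = [0, 1, 2, 3, 4] := by decide
    set a := PySem.List.pyGetD reward 0 0 with ha
    simp only [hr, List.foldl, List.reverse]
    simp only [PySem.Int.floordiv_eq_ediv_of_pos (by norm_num : (0:Int) < 64),
      PySem.Int.floordiv_eq_ediv_of_pos (by norm_num : (0:Int) < 64 ^ 4),
      PySem.Int.floordiv_eq_ediv_of_pos (by norm_num : (0:Int) < 64 ^ 3),
      PySem.Int.floordiv_eq_ediv_of_pos (by norm_num : (0:Int) < 64 ^ 2),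
      PySem.Int.floordiv_eq_ediv_of_pos (by norm_num : (0:Int) < 1),
      PySem.Int.mod_eq_emod_of_pos (by norm_num : (0:Int) < 64),
      PySem.Int.mod_eq_emod_of_pos (by norm_num : (0:Int) < 64 ^ 5),
      PySem.Int.mod_eq_emod_of_pos (by norm_num : (0:Int) < 64 ^ 4),
      PySem.Int.mod_eq_emod_of_pos (by norm_num : (0:Int) < 64 ^ 3),
      PySem.Int.mod_eq_emod_of_pos (by norm_num : (0:Int) < 64 ^ 2)]
    simp only [show ((0:Int)) = ((0:Nat):Int) from rfl, show ((1:Int)) = ((1:Nat):Int) from rfl,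
      show ((2:Int)) = ((2:Nat):Int) from rfl, show ((3:Int)) = ((3:Nat):Int) from rfl,
      show ((4:Int)) = ((4:Nat):Int) from rfl]
    simp [PySem.List.pySetD_of_nonneg, List.set]
    omega
  · rfl
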